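-- pv_equiv track=rewrite | github.com/KUNLP/g-hrm | src/agents/GraphAgent.py | determine_target_relation_fallback
-- ===== SOURCE A (Python) =====
-- def determine_target_relation_fallback(question, entity_type):
--     """Fallback relation determination using pattern matching"""
--     question_lower = question.lower()
--
--     if entity_type == "Compound":
--         if any(word in question_lower for word in ['side effect', 'adverse', 'reaction', 'toxicity']):
--             return "Compound-causes-Side Effect"
--         elif any(word in question_lower for word in ['treat', 'therapy', 'medication']):
--             return "Compound-treats-Disease"
--         elif any(word in question_lower for word in ['gene', 'protein', 'interaction']):
--             return "Compound-binds-Gene"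
--         else:
--             return "Compound-causes-Side Effect"  # default for compounds
--     elif entity_type == "Disease":
--         if any(word in question_lower for word in ['symptom', 'present']):
--             return "Disease-presents-Symptom"
--         else:
--             return "Disease-presents-Symptom"  # default for diseases
--     elif entity_type == "Gene":
--         if any(word in question_lower for word in ['pathway', 'process']):
--             return "Gene-participates-Pathway"
--         else:
--             return "Gene-participates-Pathway"  # default for genes
--     else:
--         return "Compound-causes-Side Effect"  # general fallback
-- ===== SOURCE B (Python) =====
-- _KEYWORD_RANK = [
--     ('side effect', 0), ('adverse', 0), ('reaction', 0), ('toxicity', 0),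
--     ('treat', 1), ('therapy', 1), ('medication', 1),
--     ('gene', 2), ('protein', 2), ('interaction', 2),
-- ]
-- _COMPOUND_RELATIONS = [
--     "Compound-causes-Side Effect",
--     "Compound-treats-Disease",
--     "Compound-binds-Gene",
-- ]
--
--
-- def determine_target_relation_fallback(question, entity_type):
--     """Min-priority keyword rank for Compound; constant answers otherwise."""
--     if entity_type == "Disease":
--         return "Disease-presents-Symptom"
--     if entity_type == "Gene":
--         return "Gene-participates-Pathway"
--     if entity_type != "Compound":
--         return "Compound-causes-Side Effect"
--     q = question.lower()
--     rank = min((r for kw, r in _KEYWORD_RANK if kw in q), default=0)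
--     return _COMPOUND_RELATIONS[rank]
-- ===== Notes on version B (the rewrite author's own statement) =====
-- stated objective: alternative
-- what changed: Replaced the ordered if/elif group-wise any() scan by a min-priority computation: one flat keyword-to-rank list, take the minimum rank among all matching keywords (default 0) and index a relations array; Disease/Gene/unknown branches return constants directly since their keyword checks were no-ops.
import Mathlib
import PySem

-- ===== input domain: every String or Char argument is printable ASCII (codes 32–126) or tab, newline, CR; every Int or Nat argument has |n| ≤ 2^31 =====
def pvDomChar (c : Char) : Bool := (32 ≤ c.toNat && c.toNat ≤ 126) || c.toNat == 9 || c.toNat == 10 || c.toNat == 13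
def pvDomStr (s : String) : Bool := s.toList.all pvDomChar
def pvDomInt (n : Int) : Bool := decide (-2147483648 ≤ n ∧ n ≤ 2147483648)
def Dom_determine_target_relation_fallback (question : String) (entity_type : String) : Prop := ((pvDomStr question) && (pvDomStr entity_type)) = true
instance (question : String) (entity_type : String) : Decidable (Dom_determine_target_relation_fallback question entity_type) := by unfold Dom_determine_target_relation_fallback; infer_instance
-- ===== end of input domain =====

-- B replaces A's ordered if/elif any()-group scan by a min-priority-rank computation over one flat keyword→rank list (Disease/Gene/unknown become direct constants); same cost, different algorithm.


-- ===== PORT A =====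
def determine_target_relation_fallback (question : String) (entity_type : String) : String :=
  let question_lower := PySem.Str.lower question
  if entity_type == "Compound" then
    if ["side effect", "adverse", "reaction", "toxicity"].any (fun word => PySem.Str.isIn word question_lower) then
      "Compound-causes-Side Effect"
    else if ["treat", "therapy", "medication"].any (fun word => PySem.Str.isIn word question_lower) then
      "Compound-treats-Disease"
    else if ["gene", "protein", "interaction"].any (fun word => PySem.Str.isIn word question_lower) then
      "Compound-binds-Gene"
    else
      "Compound-causes-Side Effect"
  else if entity_type == "Disease" then
    if ["symptom", "present"].any (fun word => PySem.Str.isIn word question_lower) then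
      "Disease-presents-Symptom"
    else
      "Disease-presents-Symptom"
  else if entity_type == "Gene" then
    if ["pathway", "process"].any (fun word => PySem.Str.isIn word question_lower) then
      "Gene-participates-Pathway"
    else
      "Gene-participates-Pathway"
  else
    "Compound-causes-Side Effect"

-- ===== PORT B =====
-- flat keyword → priority rank list
def pvKeywordRank : List (String × Nat) :=
  [ ("side effect", 0), ("adverse", 0), ("reaction", 0), ("toxicity", 0),
    ("treat", 1), ("therapy", 1), ("medication", 1),
    ("gene", 2), ("protein", 2), ("interaction", 2) ]

def pvCompoundRelations : List String :=
  ["Compound-causes-Side Effect", "Compound-treats-Disease", "Compound-binds-Gene"]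

def determine_target_relation_fallback_alt (question : String) (entity_type : String) : String :=
  if entity_type == "Disease" then "Disease-presents-Symptom"
  else if entity_type == "Gene" then "Gene-participates-Pathway"
  else if entity_type != "Compound" then "Compound-causes-Side Effect"
  else
    let q := PySem.Str.lower question
    let ranks := pvKeywordRank.filterMap (fun p => if PySem.Str.isIn p.1 q then some p.2 else none)
    let rank := (PySem.List.min? ranks (fun r => r)).getD 0   -- min(..., default=0)
    PySem.List.pyGetD pvCompoundRelations (rank : Int) ""    -- rank ≤ 2, so the index is always in range

-- ===== PRECONDITION & SPEC =====
def Spec_determine_target_relation_fallback (question : String) (entity_type : String) (out : String) : Prop := out = determine_target_relation_fallback_alt question entity_type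
instance (question : String) (entity_type : String) (out : String) : Decidable (Spec_determine_target_relation_fallback question entity_type out) := by unfold Spec_determine_target_relation_fallback; infer_instance

-- ===== CLAIM =====
def Claim_equal_determine_target_relation_fallback : Prop := ∀ (question : String) (entity_type : String), Dom_determine_target_relation_fallback question entity_type → Spec_determine_target_relation_fallback question entity_type (determine_target_relation_fallback question entity_type)

-- ===== LEMMAS AND PROOFS =====

-- ===== VERDICT =====
theorem determine_target_relation_fallback_spec : Claim_equal_determine_target_relation_fallback := by
  intro question entity_type _
  unfold Spec_determine_target_relation_fallback determine_target_relation_fallback determine_target_relation_fallback_alt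
  by_cases h1 : entity_type = "Compound"
  · subst h1
    simp only [pvKeywordRank, List.filterMap_cons, List.filterMap_nil, List.any_cons, List.any_nil,
      PySem.Str.isIn_eq, PySem.Str.toList_lower, beq_self_eq_true, String.reduceEq, bne_self_eq_false,
      decide_false, Bool.false_eq_true, if_true, if_false, ite_true, ite_false]
    generalize PySem.Chars.isIn "side effect".toList (PySem.Chars.lower question.toList) = b1
    generalize PySem.Chars.isIn "adverse".toList (PySem.Chars.lower question.toList) = b2
    generalize PySem.Chars.isIn "reaction".toList (PySem.Chars.lower question.toList) = b3
    generalize PySem.Chars.isIn "toxicity".toList (PySem.Chars.lower question.toList) = b4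
    generalize PySem.Chars.isIn "treat".toList (PySem.Chars.lower question.toList) = b5
    generalize PySem.Chars.isIn "therapy".toList (PySem.Chars.lower question.toList) = b6
    generalize PySem.Chars.isIn "medication".toList (PySem.Chars.lower question.toList) = b7
    generalize PySem.Chars.isIn "gene".toList (PySem.Chars.lower question.toList) = b8
    generalize PySem.Chars.isIn "protein".toList (PySem.Chars.lower question.toList) = b9
    generalize PySem.Chars.isIn "interaction".toList (PySem.Chars.lower question.toList) = b10
    revert b1 b2 b3 b4 b5 b6 b7 b8 b9 b10
    decide
  · by_cases h2 : entity_type = "Disease"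
    · subst h2; simp
    · by_cases h3 : entity_type = "Gene"
      · subst h3; simp
      · simp [h1, h2, h3]
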